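-- pv_equiv track=rewrite | github.com/8fqycwdt8v-oss/chemclaw | services/mcp_tools/mcp_doc_fetcher/main.py | _offset_to_page
-- ===== SOURCE A (Python) =====
-- def _offset_to_page(byte_offset: int, page_starts: list[int]) -> int:
--     """Map a byte offset to a 1-indexed page number using the page offset table."""
--     if not page_starts:
--         return 1
--     if byte_offset < 0:
--         return 0
--     # Binary search for the last page start <= byte_offset.
--     lo, hi = 0, len(page_starts) - 1
--     result = 0
--     while lo <= hi:
--         mid = (lo + hi) // 2
--         if page_starts[mid] <= byte_offset:
--             result = mid
--             lo = mid + 1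
--         else:
--             hi = mid - 1
--     return result + 1  # 1-indexed
-- ===== SOURCE B (Python) =====
-- def _offset_to_page(byte_offset: int, page_starts: list[int]) -> int:
--     """Map a byte offset to a 1-indexed page number using the page offset table."""
--     if not page_starts:
--         return 1
--     if byte_offset < 0:
--         return 0
--     count = sum(1 for s in page_starts if s <= byte_offset)
--     return max(count, 1)
-- ===== Notes on version B (the rewrite author's own statement) =====
-- stated objective: simpler
-- what changed: Replaces the binary search (lo/hi/result loop) by a single linear count of page starts <= byte_offset, returning max(count, 1).
-- outside the precondition, e.g. on _offset_to_page(0, [0, 5, 0]): A returns 1, B returns 2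
import Mathlib
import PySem

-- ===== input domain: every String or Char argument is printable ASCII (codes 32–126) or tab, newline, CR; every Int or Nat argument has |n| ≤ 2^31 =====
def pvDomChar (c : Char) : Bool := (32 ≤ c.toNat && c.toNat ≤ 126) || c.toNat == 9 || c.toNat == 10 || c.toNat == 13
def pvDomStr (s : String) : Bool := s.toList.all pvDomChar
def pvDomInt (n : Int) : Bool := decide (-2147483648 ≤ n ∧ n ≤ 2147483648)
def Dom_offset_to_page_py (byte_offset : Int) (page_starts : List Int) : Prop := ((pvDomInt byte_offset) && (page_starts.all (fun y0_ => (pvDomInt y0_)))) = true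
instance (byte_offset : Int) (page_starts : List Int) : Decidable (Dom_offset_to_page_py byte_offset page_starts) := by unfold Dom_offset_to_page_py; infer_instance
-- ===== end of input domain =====

-- B replaces A's binary search by a single linear count of page starts ≤ byte_offset (simpler, not faster).

-- ===== PORT A =====
-- the while-loop of A: state (lo, hi, result), mid = (lo + hi) // 2, indexing via pyGet?
def pvBsLoop (ps : List Int) (off : Int) (lo hi res : Int) : Int :=
  if h : lo ≤ hi then
    let mid := PySem.Int.floordiv (lo + hi) 2
    match PySem.List.pyGet? ps mid with
    | some v => if v ≤ off then pvBsLoop ps off (mid + 1) hi mid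
                else pvBsLoop ps off lo (mid - 1) res
    | none => res   -- unreachable for the indices A uses
  else res
termination_by (hi + 1 - lo).toNat
decreasing_by
  · have := PySem.Int.floordiv_two_mid_bounds h; omega
  · have := PySem.Int.floordiv_two_mid_bounds h; omega

def offset_to_page_py (byte_offset : Int) (page_starts : List Int) : Int :=
  if page_starts = [] then 1
  else if byte_offset < 0 then 0
  else pvBsLoop page_starts byte_offset 0 ((page_starts.length : Int) - 1) 0 + 1

-- ===== PORT B =====
def offset_to_page_py_alt (byte_offset : Int) (page_starts : List Int) : Int :=
  if page_starts = [] then 1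
  else if byte_offset < 0 then 0
  else max ((page_starts.countP (fun s => s ≤ byte_offset) : Int)) 1

-- ===== PRECONDITION & SPEC =====
-- Pre_ excludes inputs where, for a nonnegative byte_offset, some page start > byte_offset precedes
-- one ≤ byte_offset (an unsorted offset table, which the caller never builds): there A's binary-search
-- result is an accident of the search path rather than a page number.
def Pre_offset_to_page_py (byte_offset : Int) (page_starts : List Int) : Prop :=
  byte_offset < 0 ∨ List.Pairwise (fun a b => b ≤ byte_offset → a ≤ byte_offset) page_starts
instance (byte_offset : Int) (page_starts : List Int) : Decidable (Pre_offset_to_page_py byte_offset page_starts) := by unfold Pre_offset_to_page_py; infer_instance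
def pvWitness_offset_to_page_py : Int × List Int := (5, [0, 3, 7])

def Spec_offset_to_page_py (byte_offset : Int) (page_starts : List Int) (out : Int) : Prop := out = offset_to_page_py_alt byte_offset page_starts
instance (byte_offset : Int) (page_starts : List Int) (out : Int) : Decidable (Spec_offset_to_page_py byte_offset page_starts out) := by unfold Spec_offset_to_page_py; infer_instance

-- ===== CLAIM (what is proved, stated in full; the proofs are below) =====
def Claim_equal_offset_to_page_py : Prop := ∀ (byte_offset : Int) (page_starts : List Int), Dom_offset_to_page_py byte_offset page_starts → Pre_offset_to_page_py byte_offset page_starts → Spec_offset_to_page_py byte_offset page_starts (offset_to_page_py byte_offset page_starts)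

-- ===== LEMMAS AND PROOFS =====

-- If the predicate '≤ off' is prefix-monotone along the list, the element at index i is ≤ off
-- iff i is below the count of elements ≤ off.
lemma pv_count_iff (off : Int) : ∀ (ps : List Int), List.Pairwise (fun a b => b ≤ off → a ≤ off) ps →
    ∀ i : Nat, (hi : i < ps.length) →
    (ps[i] ≤ off ↔ i < ps.countP (fun s => s ≤ off)) := by
  intro ps hp
  induction ps with
  | nil => intro i hi; simp at hi
  | cons a t ih =>
    have ha : ∀ x ∈ t, x ≤ off → a ≤ off := by
      intro x hx; exact (List.pairwise_cons.1 hp).1 x hx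
    have ht : List.Pairwise (fun a b => b ≤ off → a ≤ off) t := (List.pairwise_cons.1 hp).2
    intro i hi
    cases i with
    | zero =>
      simp only [List.getElem_cons_zero, List.countP_cons]
      constructor
      · intro h; simp [h]
      · intro h
        by_contra hna
        have hz : t.countP (fun s => s ≤ off) = 0 := by
          rw [List.countP_eq_zero]
          intro x hx
          simp only [decide_eq_true_eq]
          intro hxle
          exact hna (ha x hx hxle)
        simp [hna, hz] at h
    | succ j =>
      simp only [List.getElem_cons_succ, List.countP_cons]
      have hj : j < t.length := by simpa using hi
      rw [ih ht j hj]
      by_cases hle : a ≤ off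
      · simp [hle]
      · have hz : t.countP (fun s => s ≤ off) = 0 := by
          rw [List.countP_eq_zero]
          intro x hx
          simp only [decide_eq_true_eq]
          intro hxle
          exact hle (ha x hx hxle)
        simp [hle, hz]

-- Loop invariant for A's binary search on a sorted list.
lemma pv_loop (ps : List Int) (off : Int) (hp : List.Pairwise (fun a b => b ≤ off → a ≤ off) ps) :
    ∀ n : Nat, ∀ lo hi res : Int, (hi + 1 - lo).toNat = n →
    0 ≤ lo → hi < (ps.length : Int) →
    lo ≤ (ps.countP (fun s => s ≤ off) : Int) →
    (ps.countP (fun s => s ≤ off) : Int) - 1 ≤ hi →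
    res = max (lo - 1) 0 →
    pvBsLoop ps off lo hi res = max ((ps.countP (fun s => s ≤ off) : Int) - 1) 0 := by
  intro n
  induction n using Nat.strong_induction_on with
  | _ n IH =>
    intro lo hi res hn hlo hhi hloc hchi hres
    rw [pvBsLoop]
    by_cases h : lo ≤ hi
    · simp only [h, dif_pos]
      have hmid := PySem.Int.floordiv_two_mid_bounds h
      set mid := PySem.Int.floordiv (lo + hi) 2 with hm
      have h0 : 0 ≤ mid := by omega
      have h1 : mid < (ps.length : Int) := by omega
      have h1' : mid.toNat < ps.length := by omega
      rw [PySem.List.pyGet?_eq_some_getElem ps h0 h1]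
      have hiff := pv_count_iff off ps hp mid.toNat h1'
      by_cases hv : ps[mid.toNat] ≤ off
      · simp only [hv, if_pos]
        have hc : (mid.toNat : Int) < (ps.countP (fun s => s ≤ off) : Int) := by
          exact_mod_cast hiff.1 hv
        have hmt : (mid.toNat : Int) = mid := by omega
        rw [hmt] at hc
        exact IH (hi + 1 - (mid + 1)).toNat (by omega) (mid + 1) hi mid rfl
          (by omega) hhi (by omega) hchi (by omega)
      · simp only [hv, if_neg, not_false_eq_true]
        have hc : ¬ (mid.toNat : Int) < (ps.countP (fun s => s ≤ off) : Int) := by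
          intro hcon
          exact hv (hiff.2 (by exact_mod_cast hcon))
        have hmt : (mid.toNat : Int) = mid := by omega
        rw [hmt] at hc
        exact IH (mid - 1 + 1 - lo).toNat (by omega) lo (mid - 1) res rfl
          hlo (by omega) hloc (by omega) hres
    · simp only [h, dif_neg, not_false_eq_true]
      omega

-- ===== VERDICT (by name: the statement is the Claim_ definition above) =====
theorem offset_to_page_py_spec : Claim_equal_offset_to_page_py := by
  intro off ps _ hpre
  unfold Spec_offset_to_page_py offset_to_page_py offset_to_page_py_alt
  by_cases hnil : ps = []
  · simp [hnil]
  · simp only [hnil, if_neg, not_false_eq_true]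
    by_cases hneg : off < 0
    · simp [hneg]
    · have hpair : List.Pairwise (fun a b => b ≤ off → a ≤ off) ps := by
        rcases hpre with h | h
        · omega
        · exact h
      simp only [hneg, if_neg, not_false_eq_true]
      have hlen : 0 < ps.length := List.length_pos_iff.2 hnil
      have hc : ps.countP (fun s => s ≤ off) ≤ ps.length := List.countP_le_length
      rw [pv_loop ps off hpair ((ps.length : Int) - 1 + 1 - 0).toNat 0 ((ps.length : Int) - 1) 0
        rfl (by omega) (by omega) (by exact_mod_cast Int.natCast_nonneg _)
        (by omega) (by omega)]
      omega
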